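-- pv_equiv track=rewrite | github.com/liurenchang62/cross_platform_arbitrage_system_python | validation.py | normalize_entity_name
-- ===== SOURCE A (Python) =====
-- from typing import Dict, List, Optional, Tuple
--
-- def normalize_entity_name(text: str) -> str:
--     normalized: List[str] = []
--     last_space = False
--     for ch in text.lower():
--         if ch.isalnum():
--             normalized.append(ch)
--             last_space = False
--         elif ch.isspace() or ch in "-_'\u2019":
--             if not last_space:
--                 normalized.append(" ")
--                 last_space = True
--     return "".join(normalized).strip()
-- ===== SOURCE B (Python) =====
-- def normalize_entity_name(text: str) -> str:
--     intermediate = "".join(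
--         ch if ch.isalnum() else " " if (ch.isspace() or ch in "-_'\u2019") else ""
--         for ch in text.lower()
--     )
--     return " ".join(intermediate.split())
-- ===== Notes on version B (the rewrite author's own statement) =====
-- stated objective: simpler
-- what changed: Replaced the stateful single pass with a last_space flag and final strip by a stateless per-character map to keep/space/drop followed by str.split() and a space-join, which collapses separator runs and strips the ends.
import Mathlib
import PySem

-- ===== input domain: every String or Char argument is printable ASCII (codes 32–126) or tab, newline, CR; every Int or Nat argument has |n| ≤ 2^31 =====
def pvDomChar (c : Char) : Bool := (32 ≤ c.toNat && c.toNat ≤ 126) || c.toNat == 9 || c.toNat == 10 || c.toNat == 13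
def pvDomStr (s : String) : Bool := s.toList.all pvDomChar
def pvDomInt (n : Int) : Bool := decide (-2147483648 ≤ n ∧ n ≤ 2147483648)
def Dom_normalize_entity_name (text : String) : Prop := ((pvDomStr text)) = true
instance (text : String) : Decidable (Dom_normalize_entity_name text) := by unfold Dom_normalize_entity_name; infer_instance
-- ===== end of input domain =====

-- B replaces A's stateful pass (last_space flag + final strip) by a stateless per-character map followed by split/join; objective: simpler.

-- ===== PORT A =====
def normalize_entity_name (text : String) : String :=
  let st := (PySem.Chars.lower text.toList).foldl
    (fun (s : List Char × Bool) ch =>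
      if PySem.Chars.isalnum ch then (s.1 ++ [ch], false)
      else if PySem.Chars.isspace ch || "-_'’".toList.contains ch then
        (if s.2 then s else (s.1 ++ [' '], true))
      else s)
    ([], false)
  String.ofList (PySem.Chars.strip st.1)

-- ===== PORT B =====
def normalize_entity_name_alt (text : String) : String :=
  let intermediate := (PySem.Chars.lower text.toList).flatMap
    (fun ch =>
      if PySem.Chars.isalnum ch then [ch]
      else if PySem.Chars.isspace ch || "-_'’".toList.contains ch then [' ']
      else [])
  String.ofList (PySem.Chars.join [' '] (PySem.Chars.split₀ intermediate))

-- ===== PRECONDITION & SPEC =====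
def Spec_normalize_entity_name (text : String) (out : String) : Prop := out = normalize_entity_name_alt text
instance (text : String) (out : String) : Decidable (Spec_normalize_entity_name text out) := by unfold Spec_normalize_entity_name; infer_instance

-- ===== CLAIM (what is proved, stated in full; the proofs are below) =====
def Claim_equal_normalize_entity_name : Prop := ∀ (text : String), Dom_normalize_entity_name text → Spec_normalize_entity_name text (normalize_entity_name text)

-- ===== LEMMAS AND PROOFS =====

-- A's classification per character, as B maps it: keep the char, emit a space, or drop it
def pvF (ch : Char) : List Char :=
  if PySem.Chars.isalnum ch then [ch]
  else if PySem.Chars.isspace ch || "-_'’".toList.contains ch then [' ']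
  else []

-- the char stream A's loop appends, as a structural recursion on the input with the last_space flag
def pvSq : Bool → List Char → List Char
  | _, [] => []
  | ls, c :: t =>
    if PySem.Chars.isalnum c then c :: pvSq false t
    else if PySem.Chars.isspace c || "-_'’".toList.contains c then
      (if ls then pvSq true t else ' ' :: pvSq true t)
    else pvSq ls t

theorem pv_alnum_not_space (c : Char) (h : PySem.Chars.isalnum c = true) :
    PySem.Chars.isspace c = false := by
  simp only [PySem.Chars.isalnum, PySem.Chars.isalpha, PySem.Chars.isdigit, PySem.Chars.isspace,
    PySem.Chars.isupper, PySem.Chars.islower, Bool.or_eq_true, Bool.and_eq_true, decide_eq_true_eq,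
    Bool.or_eq_false_iff, Bool.and_eq_false_iff, decide_eq_false_iff_not, not_le, Char.le_def,
    UInt32.le_iff_toNat_le] at *
  have h0 : c.toNat = c.val.toNat := rfl
  have h1 : 'A'.val.toNat = 65 := rfl
  have h2 : 'Z'.val.toNat = 90 := rfl
  have h3 : 'a'.val.toNat = 97 := rfl
  have h4 : 'z'.val.toNat = 122 := rfl
  have h5 : '0'.val.toNat = 48 := rfl
  have h6 : '9'.val.toNat = 57 := rfl
  omega

-- split₀.go, one step at a time (its own equations, stated once so the proofs never unfold it)
theorem pv_go_nil (cur : List Char) (acc : List (List Char)) :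
    PySem.Chars.split₀.go [] cur acc =
      if cur.isEmpty then acc.reverse else (cur.reverse :: acc).reverse := rfl

theorem pv_go_cons (c : Char) (rest : List Char) (cur : List Char) (acc : List (List Char)) :
    PySem.Chars.split₀.go (c :: rest) cur acc =
      if PySem.Chars.isspace c then
        (if cur.isEmpty then PySem.Chars.split₀.go rest [] acc
         else PySem.Chars.split₀.go rest [] (cur.reverse :: acc))
      else PySem.Chars.split₀.go rest (c :: cur) acc := rfl

-- pvSq, one step at a time
theorem pv_sq_alnum {c : Char} (h : PySem.Chars.isalnum c = true) (b : Bool) (t : List Char) :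
    pvSq b (c :: t) = c :: pvSq false t := by
  simp only [pvSq]; rw [if_pos h]

theorem pv_sq_sep {c : Char} (h1 : ¬ PySem.Chars.isalnum c = true)
    (h2 : (PySem.Chars.isspace c || "-_'’".toList.contains c) = true) (b : Bool) (t : List Char) :
    pvSq b (c :: t) = if b then pvSq true t else ' ' :: pvSq true t := by
  simp only [pvSq]; rw [if_neg h1, if_pos h2]

theorem pv_sq_drop {c : Char} (h1 : ¬ PySem.Chars.isalnum c = true)
    (h2 : ¬ (PySem.Chars.isspace c || "-_'’".toList.contains c) = true) (b : Bool) (t : List Char) :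
    pvSq b (c :: t) = pvSq b t := by
  simp only [pvSq]; rw [if_neg h1, if_neg h2]

-- pvF, by branch
theorem pv_f_alnum {c : Char} (h : PySem.Chars.isalnum c = true) : pvF c = [c] := by
  simp only [pvF]; rw [if_pos h]

theorem pv_f_sep {c : Char} (h1 : ¬ PySem.Chars.isalnum c = true)
    (h2 : (PySem.Chars.isspace c || "-_'’".toList.contains c) = true) : pvF c = [' '] := by
  simp only [pvF]; rw [if_neg h1, if_pos h2]

theorem pv_f_drop {c : Char} (h1 : ¬ PySem.Chars.isalnum c = true)
    (h2 : ¬ (PySem.Chars.isspace c || "-_'’".toList.contains c) = true) : pvF c = [] := by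
  simp only [pvF]; rw [if_neg h1, if_neg h2]

-- A's foldl computes pvSq appended to the accumulator
theorem pv_foldl_eq_sq (cs : List Char) : ∀ (acc : List Char) (ls : Bool),
    (cs.foldl
      (fun (s : List Char × Bool) ch =>
        if PySem.Chars.isalnum ch then (s.1 ++ [ch], false)
        else if PySem.Chars.isspace ch || "-_'’".toList.contains ch then
          (if s.2 then s else (s.1 ++ [' '], true))
        else s)
      (acc, ls)).1 = acc ++ pvSq ls cs := by
  induction cs with
  | nil => intro acc ls; simp [pvSq]
  | cons c t ih =>
    intro acc ls
    rw [List.foldl_cons]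
    by_cases h1 : PySem.Chars.isalnum c = true
    · simp only [h1, if_true, ih, pv_sq_alnum h1, List.append_assoc, List.singleton_append]
    · by_cases h2 : (PySem.Chars.isspace c || "-_'’".toList.contains c) = true
      · rw [pv_sq_sep h1 h2]
        cases ls with
        | false =>
          simp only [h1, h2, Bool.false_eq_true, if_false, if_true, ih,
            List.append_assoc, List.singleton_append]
        | true =>
          simp only [h1, h2, Bool.false_eq_true, if_false, if_true, ih]
      · rw [pv_sq_drop h1 h2]
        simp only [h1, h2, Bool.false_eq_true, if_false, ih]

-- dropping leading whitespace rewinds the last_space flag to true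
theorem pv_lstrip_sq (cs : List Char) : ∀ (ls : Bool),
    PySem.Chars.lstrip (pvSq ls cs) = pvSq true cs := by
  induction cs with
  | nil => intro ls; simp [pvSq, PySem.Chars.lstrip]
  | cons c t ih =>
    intro ls
    by_cases h1 : PySem.Chars.isalnum c = true
    · rw [pv_sq_alnum h1, pv_sq_alnum h1, PySem.Chars.lstrip,
        List.dropWhile_cons_of_neg (by simp [pv_alnum_not_space c h1])]
    · by_cases h2 : (PySem.Chars.isspace c || "-_'’".toList.contains c) = true
      · rw [pv_sq_sep h1 h2, pv_sq_sep h1 h2]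
        cases ls with
        | true => simpa using ih true
        | false =>
          simp only [Bool.false_eq_true, if_false, if_true]
          rw [PySem.Chars.lstrip, List.dropWhile_cons_of_pos (by decide)]
          exact ih true
      · rw [pv_sq_drop h1 h2, pv_sq_drop h1 h2]
        exact ih ls

-- split₀.go with a nonempty word-list accumulator prepends it
theorem pv_go_acc (cs : List Char) : ∀ (cur : List Char) (acc : List (List Char)),
    PySem.Chars.split₀.go cs cur acc = acc.reverse ++ PySem.Chars.split₀.go cs cur [] := by
  induction cs with
  | nil =>
    intro cur acc
    rw [pv_go_nil, pv_go_nil]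
    cases h : cur.isEmpty with
    | true => simp
    | false => simp
  | cons c t ih =>
    intro cur acc
    rw [pv_go_cons, pv_go_cons]
    by_cases h1 : PySem.Chars.isspace c = true
    · rw [if_pos h1, if_pos h1]
      cases h2 : cur.isEmpty with
      | true => simp only [if_true]; exact ih [] acc
      | false =>
        simp only [Bool.false_eq_true, if_false]
        rw [ih [] (cur.reverse :: acc), ih [] [cur.reverse]]
        simp
    · rw [if_neg h1, if_neg h1, ih]

-- no empty word ever comes out of split₀.go
theorem pv_go_ne (cs : List Char) : ∀ (cur : List Char) (acc : List (List Char)),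
    [] ∉ acc → [] ∉ PySem.Chars.split₀.go cs cur acc := by
  induction cs with
  | nil =>
    intro cur acc hacc
    rw [pv_go_nil]
    cases h : cur.isEmpty with
    | true => simpa using hacc
    | false =>
      have hc : cur ≠ [] := by simpa [List.isEmpty_iff] using h
      simp only [Bool.false_eq_true, if_false]
      intro hmem
      simp only [List.mem_reverse, List.mem_cons] at hmem
      rcases hmem with h' | h'
      · exact hc (by simpa using congrArg List.reverse h')
      · exact hacc h'
  | cons c t ih =>
    intro cur acc hacc
    rw [pv_go_cons]
    by_cases h1 : PySem.Chars.isspace c = true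
    · rw [if_pos h1]
      cases h2 : cur.isEmpty with
      | true => simpa using ih [] acc hacc
      | false =>
        have hc : cur ≠ [] := by simpa [List.isEmpty_iff] using h2
        simp only [Bool.false_eq_true, if_false]
        refine ih [] (cur.reverse :: acc) ?_
        intro hmem
        rcases List.mem_cons.mp hmem with h' | h'
        · exact hc (by simpa using congrArg List.reverse h'.symm)
        · exact hacc h'
    · rw [if_neg h1]
      exact ih (c :: cur) acc hacc

-- a join over nonempty words is empty only for the empty word list
theorem pv_join_ne (ws : List (List Char)) (hne : ws ≠ []) (h : [] ∉ ws) :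
    PySem.Chars.join [' '] ws ≠ [] := by
  match ws with
  | [w] =>
    have : w ≠ [] := by intro hw; exact h (by simp [hw])
    simpa [PySem.Chars.join, List.intercalate] using this
  | w :: w' :: rest =>
    simp [PySem.Chars.join, List.intercalate, List.intersperse]

theorem pv_dropWhile_all_false {p : Char → Bool} (xs : List Char)
    (h : ∀ c ∈ xs, p c = false) : xs.dropWhile p = xs := by
  cases xs with
  | nil => rfl
  | cons a t => rw [List.dropWhile_cons_of_neg (by simp [h a (by simp)])]

-- the master invariant: stripping A's remaining stream from a mid-word state yields B's joined words
theorem pv_master (cs : List Char) : ∀ (cur : List Char),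
    (∀ c ∈ cur, PySem.Chars.isspace c = false) →
    PySem.Chars.rstrip (cur.reverse ++ pvSq cur.isEmpty cs) =
      PySem.Chars.join [' '] (PySem.Chars.split₀.go (cs.flatMap pvF) cur []) := by
  induction cs with
  | nil =>
    intro cur hcur
    cases h : cur.isEmpty with
    | true =>
      have : cur = [] := by simpa [List.isEmpty_iff] using h
      simp [this, pvSq, pv_go_nil, PySem.Chars.rstrip, PySem.Chars.join, List.intercalate]
    | false =>
      simp only [List.flatMap_nil, pv_go_nil, h, Bool.false_eq_true, if_false, pvSq]
      rw [List.append_nil, PySem.Chars.rstrip, List.reverse_reverse,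
        pv_dropWhile_all_false cur hcur]
      simp [PySem.Chars.join, List.intercalate]
  | cons c t ih =>
    intro cur hcur
    by_cases h1 : PySem.Chars.isalnum c = true
    · have hns := pv_alnum_not_space c h1
      have step : PySem.Chars.split₀.go ((c :: t).flatMap pvF) cur [] =
          PySem.Chars.split₀.go (t.flatMap pvF) (c :: cur) [] := by
        rw [List.flatMap_cons, pv_f_alnum h1, List.singleton_append, pv_go_cons,
          if_neg (by simp [hns])]
      have lhs : cur.reverse ++ pvSq cur.isEmpty (c :: t) =
          (c :: cur).reverse ++ pvSq (c :: cur).isEmpty t := by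
        rw [pv_sq_alnum h1]
        simp
      rw [step, lhs]
      exact ih (c :: cur) (List.forall_mem_cons.mpr ⟨hns, hcur⟩)
    · by_cases h2 : (PySem.Chars.isspace c || "-_'’".toList.contains c) = true
      · have hsp : PySem.Chars.isspace ' ' = true := by decide
        cases h : cur.isEmpty with
        | true =>
          have hc : cur = [] := by simpa [List.isEmpty_iff] using h
          subst hc
          have step : PySem.Chars.split₀.go ((c :: t).flatMap pvF) [] [] =
              PySem.Chars.split₀.go (t.flatMap pvF) [] [] := by
            rw [List.flatMap_cons, pv_f_sep h1 h2, List.singleton_append, pv_go_cons,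
              if_pos hsp, if_pos (by simp)]
          rw [step]
          have := ih [] (by simp)
          simpa [pv_sq_sep h1 h2] using this
        | false =>
          have hc : cur ≠ [] := by simpa [List.isEmpty_iff] using h
          have step : PySem.Chars.split₀.go ((c :: t).flatMap pvF) cur [] =
              [cur.reverse] ++ PySem.Chars.split₀.go (t.flatMap pvF) [] [] := by
            rw [List.flatMap_cons, pv_f_sep h1 h2, List.singleton_append, pv_go_cons,
              if_pos hsp, if_neg (by simp [h]), pv_go_acc]
            rfl
          rw [step]
          have ihz := ih [] (by simp)
          simp only [List.isEmpty_nil, List.reverse_nil, List.nil_append] at ihz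
          have hsq : pvSq false (c :: t) = ' ' :: pvSq true t := by
            rw [pv_sq_sep h1 h2]
            simp
          rw [hsq]
          set S := pvSq true t with hS
          set ws := PySem.Chars.split₀.go (t.flatMap pvF) [] [] with hws
          have hrev : (cur.reverse ++ ' ' :: S).reverse = S.reverse ++ ' ' :: cur := by
            simp
          by_cases hz : S.reverse.dropWhile PySem.Chars.isspace = []
          · have hrS : PySem.Chars.rstrip S = [] := by simp [PySem.Chars.rstrip, hz]
            have hwsnil : ws = [] := by
              by_contra hne
              exact pv_join_ne ws hne (pv_go_ne _ _ _ (by simp)) (hrS ▸ ihz).symm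
            rw [PySem.Chars.rstrip, hrev, List.dropWhile_append, hz]
            simp only [List.isEmpty_nil, if_true]
            rw [List.dropWhile_cons_of_pos hsp, pv_dropWhile_all_false cur hcur]
            simp [hwsnil, PySem.Chars.join, List.intercalate]
          · have hwsne : ws ≠ [] := by
              intro hh
              rw [hh] at ihz
              simp only [PySem.Chars.join, List.intercalate, List.intersperse,
                List.flatten_nil] at ihz
              rw [PySem.Chars.rstrip] at ihz
              exact hz (by simpa using congrArg List.reverse ihz)
            rw [PySem.Chars.rstrip, hrev, List.dropWhile_append]
            rw [if_neg (by simp [List.isEmpty_iff, hz])]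
            rw [List.reverse_append]
            have hr : (S.reverse.dropWhile PySem.Chars.isspace).reverse = PySem.Chars.rstrip S := rfl
            rw [hr, ihz]
            cases hq : ws with
            | nil => exact absurd hq hwsne
            | cons w ws' =>
              simp [PySem.Chars.join, List.intercalate]
      · have step : PySem.Chars.split₀.go ((c :: t).flatMap pvF) cur [] =
            PySem.Chars.split₀.go (t.flatMap pvF) cur [] := by
          rw [List.flatMap_cons, pv_f_drop h1 h2, List.nil_append]
        rw [step, pv_sq_drop h1 h2]
        exact ih cur hcur

-- ===== VERDICT (by name: the statement is the Claim_ definition above) =====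
theorem normalize_entity_name_spec : Claim_equal_normalize_entity_name := by
  intro text _
  unfold Spec_normalize_entity_name normalize_entity_name normalize_entity_name_alt
  simp only []
  congr 1
  rw [pv_foldl_eq_sq, List.nil_append, PySem.Chars.strip, pv_lstrip_sq]
  have h := pv_master (PySem.Chars.lower text.toList) [] (by simp)
  simp only [List.isEmpty_nil, List.reverse_nil, List.nil_append] at h
  rw [h]
  rfl
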